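-- pv_equiv track=rewrite | github.com/eveem/adventofcode2024 | day_09/main.py | list_file
-- ===== SOURCE A (Python) =====
-- def list_file(disk):
--     res = []
--     n = len(disk)
--     i = 0
--
--     while i < n:
--         ch = disk[i]
--         curr = 1
--         while i + 1 < n and disk[i] == disk[i + 1]:
--             curr += 1
--             i += 1
--         if ch != ".":
--             res.append([ch, curr, i - curr + 1])
--         i += 1
--
--     return res
-- ===== SOURCE B (Python) =====
-- def list_file(disk):
--     # Pass 1: run-length encode with a single element-wise fold (no index arithmetic).
--     runs = []
--     for ch in disk:
--         if runs and runs[-1][0] == ch: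
--             runs[-1][1] += 1
--         else:
--             runs.append([ch, 1])
--     # Pass 2: compute start offsets and keep non-dot runs.
--     res = []
--     start = 0
--     for ch, length in runs:
--         if ch != ".":
--             res.append([ch, length, start])
--         start += length
--     return res
-- ===== Notes on version B (the rewrite author's own statement) =====
-- stated objective: idiomatic
-- what changed: Replaces the two-pointer while loop with inner scan and index arithmetic by a two-pass decomposition: an element-wise fold that run-length encodes the list, then a linear pass that threads a running start offset and keeps non-dot runs.
import Mathlib
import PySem

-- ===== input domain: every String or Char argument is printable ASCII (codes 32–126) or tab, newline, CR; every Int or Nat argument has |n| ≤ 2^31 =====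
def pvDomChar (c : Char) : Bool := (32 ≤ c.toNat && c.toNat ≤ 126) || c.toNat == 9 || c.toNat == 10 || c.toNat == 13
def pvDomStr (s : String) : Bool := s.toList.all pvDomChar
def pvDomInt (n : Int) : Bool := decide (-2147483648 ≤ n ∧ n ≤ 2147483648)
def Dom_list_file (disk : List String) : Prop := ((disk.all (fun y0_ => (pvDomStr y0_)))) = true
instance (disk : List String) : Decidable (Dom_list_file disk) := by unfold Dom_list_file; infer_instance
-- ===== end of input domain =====

-- B replaces A's two-pointer scan with index arithmetic by a two-pass decomposition:
-- run-length encode with an element-wise fold, then a pass threading a start offset (idiomatic; same cost).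

-- ===== PORT A =====
-- inner while loop: 'while i + 1 < n and disk[i] == disk[i+1]: curr += 1; i += 1'
-- (fuel = disk.length always suffices since i only grows and stays below n)
def listFileInner (disk : List String) (n : Int) : Nat → Int → Int → Int × Int
  | 0, curr, i => (curr, i)
  | Nat.succ fuel, curr, i =>
    if i + 1 < n ∧ PySem.List.pyGet? disk i = PySem.List.pyGet? disk (i + 1) then
      listFileInner disk n fuel (curr + 1) (i + 1)
    else (curr, i)

-- outer while loop over i with accumulator res
def listFileOuter (disk : List String) (n : Int) : Nat → Int → List (String × Int × Int) → List (String × Int × Int)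
  | 0, _, res => res
  | Nat.succ fuel, i, res =>
    if i < n then
      match PySem.List.pyGet? disk i with   -- ch = disk[i]; always in range here (0 ≤ i < n)
      | some ch =>
        let p := listFileInner disk n disk.length 1 i
        let res' := if ch ≠ "." then res ++ [(ch, p.1, p.2 - p.1 + 1)] else res
        listFileOuter disk n fuel (p.2 + 1) res'
      | none => res
    else res

def list_file (disk : List String) : List (String × Int × Int) :=
  listFileOuter disk (disk.length : Int) disk.length 0 []

-- ===== PORT B =====
-- 'if runs and runs[-1][0] == ch: runs[-1][1] += 1 else: runs.append([ch, 1])'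
def pushRun (runs : List (String × Int)) (ch : String) : List (String × Int) :=
  match runs.getLast? with
  | some (c, k) => if c = ch then runs.dropLast ++ [(c, k + 1)] else runs ++ [(ch, 1)]
  | none => [(ch, 1)]

def runsB (disk : List String) : List (String × Int) := disk.foldl pushRun []

-- second pass: start offsets, keep non-dot runs
def emitB : List (String × Int) → Int → List (String × Int × Int)
  | [], _ => []
  | (ch, len) :: rest, start =>
    (if ch ≠ "." then [(ch, len, start)] else []) ++ emitB rest (start + len)

def list_file_alt (disk : List String) : List (String × Int × Int) :=
  emitB (runsB disk) 0

-- ===== PRECONDITION & SPEC =====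
def Spec_list_file (disk : List String) (out : List (String × Int × Int)) : Prop := out = list_file_alt disk
instance (disk : List String) (out : List (String × Int × Int)) : Decidable (Spec_list_file disk out) := by unfold Spec_list_file; infer_instance

-- ===== CLAIM (what is proved, stated in full; the proofs are below) =====
def Claim_equal_list_file : Prop := ∀ (disk : List String), Dom_list_file disk → Spec_list_file disk (list_file disk)

-- ===== LEMMAS AND PROOFS =====

-- number of leading elements equal to ch
def leadCount (ch : String) : List String → Nat
  | [] => 0
  | x :: xs => if x = ch then leadCount ch xs + 1 else 0

-- canonical run-by-run reference both ports are reduced to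
def goRef : List String → Int → List (String × Int × Int)
  | [], _ => []
  | ch :: rest, start =>
    let k := leadCount ch rest
    (if ch ≠ "." then [(ch, (k : Int) + 1, start)] else []) ++
      goRef (rest.drop k) (start + (k : Int) + 1)
termination_by l _ => l.length
decreasing_by simp

-- run-length encoding, reference form
def rleRef : List String → List (String × Int)
  | [] => []
  | ch :: rest =>
    (ch, (leadCount ch rest : Int) + 1) :: rleRef (rest.drop (leadCount ch rest))
termination_by l => l.length
decreasing_by simp

theorem leadCount_le {ch : String} (l : List String) : leadCount ch l ≤ l.length := by
  induction l with
  | nil => simp [leadCount]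
  | cons x xs ih =>
    simp only [leadCount]
    split <;> simp <;> omega

-- ---- B side ----
theorem foldl_pushRun_run (l : List String) : ∀ (runs : List (String × Int)) (c : String) (k : Int),
    List.foldl pushRun (runs ++ [(c, k)]) l =
      runs ++ (c, k + (leadCount c l : Int)) :: rleRef (l.drop (leadCount c l)) := by
  induction l with
  | nil => intro runs c k; rw [rleRef.eq_def]; simp [leadCount]
  | cons x xs ih =>
    intro runs c k
    simp only [List.foldl_cons]
    by_cases hx : c = x
    · have h1 : pushRun (runs ++ [(c, k)]) x = runs ++ [(c, k + 1)] := by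
        simp [pushRun, hx]
      rw [h1, ih]
      subst hx
      simp [leadCount]
      omega
    · have h1 : pushRun (runs ++ [(c, k)]) x = (runs ++ [(c, k)]) ++ [(x, 1)] := by
        simp [pushRun, hx]
      rw [h1, ih]
      have hx' : x ≠ c := fun h => hx h.symm
      simp only [leadCount, if_neg hx', List.drop_zero]
      rw [rleRef]
      simp
      omega

theorem runsB_eq_rleRef (disk : List String) : runsB disk = rleRef disk := by
  cases disk with
  | nil => simp [runsB, rleRef]
  | cons x xs =>
    have h0 : pushRun [] x = [(x, 1)] := by simp [pushRun]
    have := foldl_pushRun_run xs ([] : List (String × Int)) x 1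
    simp only [List.nil_append] at this
    simp only [runsB, List.foldl_cons, h0, this, rleRef]
    congr 2
    push_cast; ring

theorem emitB_rleRef (l : List String) : ∀ (s : Int), emitB (rleRef l) s = goRef l s := by
  induction l using rleRef.induct with
  | case1 => intro s; simp [rleRef, emitB, goRef]
  | case2 ch rest ih =>
    intro s
    rw [rleRef, goRef]
    simp only [emitB]
    rw [ih]
    congr 2
    ring

theorem alt_eq_goRef (disk : List String) : list_file_alt disk = goRef disk 0 := by
  rw [list_file_alt, runsB_eq_rleRef, emitB_rleRef]

-- ---- A side ----
theorem inner_eq (disk : List String) : ∀ (fuel j : Nat) (curr : Int) (hj : j < disk.length),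
      leadCount (disk[j]'hj) (disk.drop (j + 1)) ≤ fuel →
      listFileInner disk (disk.length : Int) fuel curr (j : Int) =
        (curr + (leadCount (disk[j]'hj) (disk.drop (j + 1)) : Int),
         (j : Int) + (leadCount (disk[j]'hj) (disk.drop (j + 1)) : Int)) := by
  intro fuel
  induction fuel with
  | zero =>
    intro j curr hj hle
    have hk : leadCount (disk[j]'hj) (disk.drop (j + 1)) = 0 := Nat.le_zero.mp hle
    simp [listFileInner, hk]
  | succ fuel ih =>
    intro j curr hj hle
    by_cases h1 : j + 1 < disk.length
    · have hdrop : disk.drop (j + 1) = disk[j+1] :: disk.drop (j + 1 + 1) :=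
        List.drop_eq_getElem_cons h1
      by_cases h2 : disk[j]'hj = disk[j+1]'h1
      · have hk : leadCount (disk[j]'hj) (disk.drop (j + 1)) =
            leadCount (disk[j+1]'h1) (disk.drop (j + 1 + 1)) + 1 := by
          rw [hdrop, leadCount, if_pos h2.symm, h2]
        have hcond : (j:Int) + 1 < ((disk.length : Nat) : Int) ∧
            PySem.List.pyGet? disk (j:Int) = PySem.List.pyGet? disk ((j:Int) + 1) := by
          refine ⟨by exact_mod_cast h1, ?_⟩
          have hc : ((j:Int) + 1) = ((j + 1 : Nat) : Int) := by push_cast; ring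
          rw [hc, PySem.List.pyGet?_natCast, PySem.List.pyGet?_natCast,
            List.getElem?_eq_getElem hj, List.getElem?_eq_getElem h1, h2]
        rw [listFileInner, if_pos hcond]
        have hc : ((j:Int) + 1) = ((j + 1 : Nat) : Int) := by push_cast; ring
        rw [hc, ih (j + 1) (curr + 1) h1 (by omega)]
        rw [hk]
        simp only [Prod.mk.injEq]
        push_cast
        exact ⟨by ring, by ring⟩
      · have hk : leadCount (disk[j]'hj) (disk.drop (j + 1)) = 0 := by
          rw [hdrop, leadCount, if_neg (fun h => h2 h.symm)]
        have hcond : ¬((j:Int) + 1 < ((disk.length : Nat) : Int) ∧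
            PySem.List.pyGet? disk (j:Int) = PySem.List.pyGet? disk ((j:Int) + 1)) := by
          rintro ⟨-, heq⟩
          have hc : ((j:Int) + 1) = ((j + 1 : Nat) : Int) := by push_cast; ring
          rw [hc, PySem.List.pyGet?_natCast, PySem.List.pyGet?_natCast,
            List.getElem?_eq_getElem hj, List.getElem?_eq_getElem h1] at heq
          exact h2 (Option.some.inj heq)
        rw [listFileInner, if_neg hcond, hk]
        simp
    · have hk : leadCount (disk[j]'hj) (disk.drop (j + 1)) = 0 := by
        rw [List.drop_eq_nil_of_le (by omega), leadCount]
      have hcond : ¬((j:Int) + 1 < ((disk.length : Nat) : Int) ∧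
          PySem.List.pyGet? disk (j:Int) = PySem.List.pyGet? disk ((j:Int) + 1)) := by
        rintro ⟨hlt, -⟩
        have : j + 1 < disk.length := by exact_mod_cast hlt
        omega
      rw [listFileInner, if_neg hcond, hk]
      simp

theorem outer_eq (disk : List String) : ∀ (fuel j : Nat) (res : List (String × Int × Int)),
    disk.length - j ≤ fuel →
    listFileOuter disk (disk.length : Int) fuel (j : Int) res =
      res ++ goRef (disk.drop j) (j : Int) := by
  intro fuel
  induction fuel with
  | zero =>
    intro j res hle
    rw [List.drop_eq_nil_of_le (by omega)]
    rw [goRef.eq_def]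
    simp [listFileOuter]
  | succ fuel ih =>
    intro j res hle
    by_cases hj : j < disk.length
    · have hget : PySem.List.pyGet? disk (j:Int) = some (disk[j]'hj) := by
        rw [PySem.List.pyGet?_natCast, List.getElem?_eq_getElem hj]
      have hkle : leadCount (disk[j]'hj) (disk.drop (j + 1)) ≤ disk.length := by
        have h := leadCount_le (ch := disk[j]'hj) (disk.drop (j + 1))
        simp at h
        omega
      have hinner := inner_eq disk disk.length j 1 hj hkle
      set k := leadCount (disk[j]'hj) (disk.drop (j + 1)) with hkdef
      rw [listFileOuter, if_pos (show (j:Int) < ((disk.length : Nat) : Int) from by exact_mod_cast hj), hget]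
      dsimp only
      rw [hinner]
      dsimp only
      have hc : (j:Int) + (k:Int) + 1 = ((j + k + 1 : Nat) : Int) := by push_cast; ring
      have hIH := fun r => ih (j + k + 1) r (by omega)
      rw [hc, hIH]
      rw [List.drop_eq_getElem_cons hj, goRef]
      have hdd : (disk.drop (j + 1)).drop k = disk.drop (j + k + 1) := by
        rw [List.drop_drop]
        congr 1
        omega
      rw [← hkdef, hdd]
      have hc2 : ((j + k + 1 : Nat) : Int) = (j:Int) + (k:Int) + 1 := by push_cast; ring
      rw [hc2]
      by_cases hch : disk[j]'hj = "."
      · simp [hch]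
      · have h1k : (1 : Int) + (k:Int) = (k:Int) + 1 := by ring
        simp [hch, h1k]
        omega
    · have hcond : ¬((j:Int) < ((disk.length : Nat) : Int)) := by exact_mod_cast hj
      rw [listFileOuter, if_neg hcond, List.drop_eq_nil_of_le (by omega)]
      rw [goRef.eq_def]
      simp

-- ===== VERDICT (by name: the statement is the Claim_ definition above) =====
theorem list_file_spec : Claim_equal_list_file := by
  intro disk _
  unfold Spec_list_file
  have h := outer_eq disk disk.length 0 [] (by omega)
  simp only [Nat.cast_zero, List.drop_zero, List.nil_append] at h
  rw [list_file, h, alt_eq_goRef]
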